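-- pv_equiv track=rewrite | github.com/Quads-Inc/robby-the-match | scripts/ai_content_engine.py | analyze_queue_mix
-- ===== SOURCE A (Python) =====
-- from typing import Any, Dict, List, Optional, Tuple
--
-- MIX_RATIOS = {
--     "あるある": 0.50,
--     "給与": 0.20,
--     "地域ネタ": 0.15,
--     "転職": 0.10,
--     "トレンド": 0.05,
-- }
--
-- CATEGORY_TO_CONTENT_TYPE = {
--     "あるある": "aruaru",
--     "給与": "salary",
--     "地域ネタ": "local",
--     "転職": "career",
--     "トレンド": "trend",
-- }
--
-- def analyze_queue_mix(queue: dict) -> Dict[str, int]: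
--     """Analyze content type distribution in pending/ready posts."""
--     dist: Dict[str, int] = {cat: 0 for cat in MIX_RATIOS}
--     for p in queue.get("posts", []):
--         if p.get("status") in ("pending", "ready"):
--             ct = p.get("content_type", "")
--             # Map content_type back to category
--             for cat, ctype in CATEGORY_TO_CONTENT_TYPE.items():
--                 if ctype == ct:
--                     dist[cat] += 1
--                     break
--     return dist
-- ===== SOURCE B (Python) =====
-- from typing import Dict
--
-- MIX_RATIOS = {
--     "あるある": 0.50,
--     "給与": 0.20,
--     "地域ネタ": 0.15,
--     "転職": 0.10,
--     "トレンド": 0.05,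
-- }
--
-- CATEGORY_TO_CONTENT_TYPE = {
--     "あるある": "aruaru",
--     "給与": "salary",
--     "地域ネタ": "local",
--     "転職": "career",
--     "トレンド": "trend",
-- }
--
-- def analyze_queue_mix(queue: dict) -> Dict[str, int]:
--     """Analyze content type distribution in pending/ready posts."""
--     posts = queue.get("posts", [])
--     return {
--         cat: sum(1 for p in posts
--                  if p.get("status") in ("pending", "ready")
--                  and p.get("content_type", "") == ctype)
--         for cat, ctype in CATEGORY_TO_CONTENT_TYPE.items()
--     }
-- ===== Notes on version B (the rewrite author's own statement) =====
-- stated objective: simpler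
-- what changed: Loop interchange: A is post-major (one pass over posts, reverse-looking each post's content_type up in the category map, mutating a counter dict), while B is category-major (for each category it makes its own pass over the posts counting matches with sum(...)), building the result dict directly with no mutable state.
import Mathlib
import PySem

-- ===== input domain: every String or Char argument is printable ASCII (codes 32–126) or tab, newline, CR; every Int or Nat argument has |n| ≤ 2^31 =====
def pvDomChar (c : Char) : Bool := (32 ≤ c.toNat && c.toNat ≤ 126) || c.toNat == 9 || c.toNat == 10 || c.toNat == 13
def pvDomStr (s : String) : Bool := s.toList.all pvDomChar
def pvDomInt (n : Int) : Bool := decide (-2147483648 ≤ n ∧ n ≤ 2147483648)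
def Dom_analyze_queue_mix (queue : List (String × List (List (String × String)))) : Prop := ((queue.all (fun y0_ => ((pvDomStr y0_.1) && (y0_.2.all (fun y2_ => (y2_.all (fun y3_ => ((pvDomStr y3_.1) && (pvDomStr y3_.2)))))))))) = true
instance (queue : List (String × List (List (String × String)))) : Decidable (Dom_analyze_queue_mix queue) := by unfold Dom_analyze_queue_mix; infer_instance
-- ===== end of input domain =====

-- B interchanges the loops: instead of A's post-major pass with a per-post reverse lookup into
-- a mutable counter dict, B is category-major — one counting pass over the posts per category,
-- building the result directly (objective: simpler, no mutable state).

-- ===== PORT A =====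
def CATEGORY_TO_CONTENT_TYPE : PySem.Dict String String :=
  PySem.Dict.mk [("あるある", "aruaru"), ("給与", "salary"), ("地域ネタ", "local"),
                 ("転職", "career"), ("トレンド", "trend")]

-- 'for cat, ctype in CATEGORY_TO_CONTENT_TYPE.items(): if ctype == ct: dist[cat] += 1; break'
-- dist[cat] += 1 is Dict.modify cat 0 (· + 1); cat is always a key of dist, so the default 0 is never read.
def aqmMapBack : List (String × String) → String → PySem.Dict String Int → PySem.Dict String Int
  | [], _, dist => dist
  | (cat, ctype) :: rest, ct, dist =>
      if ctype == ct then dist.modify cat 0 (· + 1) else aqmMapBack rest ct dist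

def analyze_queue_mix (queue : List (String × List (List (String × String)))) : List (String × Int) :=
  -- dist = {cat: 0 for cat in MIX_RATIOS}
  let dist : PySem.Dict String Int :=
    PySem.Dict.mk [("あるある", 0), ("給与", 0), ("地域ネタ", 0), ("転職", 0), ("トレンド", 0)]
  let dist := ((PySem.Dict.mk queue).getD "posts" []).foldl
    (fun dist p =>
      let st := (PySem.Dict.mk p).get? "status"
      if st == some "pending" || st == some "ready" then
        let ct := (PySem.Dict.mk p).getD "content_type" ""
        aqmMapBack CATEGORY_TO_CONTENT_TYPE.items ct dist
      else dist) dist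
  dist.items

-- ===== PORT B =====
-- 'sum(1 for p in posts if p.get("status") in ("pending","ready") and p.get("content_type","") == ctype)'
def analyze_queue_mix_alt (queue : List (String × List (List (String × String)))) : List (String × Int) :=
  let posts := (PySem.Dict.mk queue).getD "posts" []
  CATEGORY_TO_CONTENT_TYPE.items.map (fun c =>
    (c.1,
     posts.foldl
       (fun acc p =>
         if ((PySem.Dict.mk p).get? "status" == some "pending" ||
             (PySem.Dict.mk p).get? "status" == some "ready") &&
            ((PySem.Dict.mk p).getD "content_type" "" == c.2) then acc + 1 else acc)
       (0 : Int)))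

-- ===== PRECONDITION & SPEC =====
def Spec_analyze_queue_mix (queue : List (String × List (List (String × String)))) (out : List (String × Int)) : Prop := out = analyze_queue_mix_alt queue
instance (queue : List (String × List (List (String × String)))) (out : List (String × Int)) : Decidable (Spec_analyze_queue_mix queue out) := by unfold Spec_analyze_queue_mix; infer_instance

-- ===== CLAIM (what is proved, stated in full; the proofs are below) =====
def Claim_equal_analyze_queue_mix : Prop := ∀ (queue : List (String × List (List (String × String)))), Dom_analyze_queue_mix queue → Spec_analyze_queue_mix queue (analyze_queue_mix queue)

-- ===== LEMMAS AND PROOFS =====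

-- the post predicate and content type shared by both loops
def aqmOk (p : List (String × String)) : Bool :=
  (PySem.Dict.mk p).get? "status" == some "pending" ||
  (PySem.Dict.mk p).get? "status" == some "ready"

def aqmCt (p : List (String × String)) : String := (PySem.Dict.mk p).getD "content_type" ""

-- the relevant content types of a post list
def aqmCts (posts : List (List (String × String))) : List String :=
  (posts.filter aqmOk).map aqmCt

lemma aqmCts_cons (p : List (String × String)) (posts : List (List (String × String))) :
    aqmCts (p :: posts) = if aqmOk p then aqmCt p :: aqmCts posts else aqmCts posts := by
  by_cases h : aqmOk p <;> simp [aqmCts, h]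

-- B's per-category counting pass computes the count of that content type
lemma aqmB_count (posts : List (List (String × String))) (acc : Int) (v : String) :
    (posts.foldl
      (fun acc p =>
        if ((PySem.Dict.mk p).get? "status" == some "pending" ||
            (PySem.Dict.mk p).get? "status" == some "ready") &&
           ((PySem.Dict.mk p).getD "content_type" "" == v) then acc + 1 else acc)
      acc) = acc + ((aqmCts posts).count v : Int) := by
  induction posts generalizing acc with
  | nil => simp [aqmCts]
  | cons p posts ih =>
      rw [List.foldl_cons]
      show (posts.foldl _ (if aqmOk p && (aqmCt p == v) then acc + 1 else acc)) = _
      rw [aqmCts_cons, ih]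
      by_cases h : aqmOk p <;> by_cases hv : aqmCt p == v <;>
        simp [h, hv, List.count_cons]
      omega

-- A's loop, from an arbitrary five-value dist, adds the count of each category's content type
lemma aqmA_fold (posts : List (List (String × String))) (a b c d e : Int) :
    (posts.foldl
      (fun dist p =>
        let st := (PySem.Dict.mk p).get? "status"
        if st == some "pending" || st == some "ready" then
          let ct := (PySem.Dict.mk p).getD "content_type" ""
          aqmMapBack CATEGORY_TO_CONTENT_TYPE.items ct dist
        else dist)
      (PySem.Dict.mk [("あるある", a), ("給与", b), ("地域ネタ", c), ("転職", d), ("トレンド", e)])) =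
    PySem.Dict.mk [("あるある", a + ((aqmCts posts).count "aruaru" : Int)),
                   ("給与", b + ((aqmCts posts).count "salary" : Int)),
                   ("地域ネタ", c + ((aqmCts posts).count "local" : Int)),
                   ("転職", d + ((aqmCts posts).count "career" : Int)),
                   ("トレンド", e + ((aqmCts posts).count "trend" : Int))] := by
  induction posts generalizing a b c d e with
  | nil => simp [aqmCts]
  | cons p posts ih =>
      rw [List.foldl_cons]
      show (posts.foldl _
        (if aqmOk p then aqmMapBack CATEGORY_TO_CONTENT_TYPE.items (aqmCt p)
          (PySem.Dict.mk [("あるある", a), ("給与", b), ("地域ネタ", c), ("転職", d), ("トレンド", e)])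
         else PySem.Dict.mk [("あるある", a), ("給与", b), ("地域ネタ", c), ("転職", d), ("トレンド", e)])) = _
      rw [aqmCts_cons]
      by_cases h : aqmOk p
      · rw [if_pos h, if_pos h]
        by_cases h1 : "aruaru" = aqmCt p
        · rw [show aqmMapBack CATEGORY_TO_CONTENT_TYPE.items (aqmCt p)
              (PySem.Dict.mk [("あるある", a), ("給与", b), ("地域ネタ", c), ("転職", d), ("トレンド", e)]) =
              PySem.Dict.mk [("あるある", a + 1), ("給与", b), ("地域ネタ", c), ("転職", d), ("トレンド", e)] from by
            simp [aqmMapBack, CATEGORY_TO_CONTENT_TYPE, beq_iff_eq, ← h1,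
                  PySem.Dict.modify, PySem.Dict.contains, PySem.Dict.get?, PySem.Dict.getD, PySem.Dict.insert], ih]
          simp [← h1, add_comm, add_left_comm]
        by_cases h2 : "salary" = aqmCt p
        · rw [show aqmMapBack CATEGORY_TO_CONTENT_TYPE.items (aqmCt p)
              (PySem.Dict.mk [("あるある", a), ("給与", b), ("地域ネタ", c), ("転職", d), ("トレンド", e)]) =
              PySem.Dict.mk [("あるある", a), ("給与", b + 1), ("地域ネタ", c), ("転職", d), ("トレンド", e)] from by
            simp [aqmMapBack, CATEGORY_TO_CONTENT_TYPE, beq_iff_eq, ← h2,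
                  PySem.Dict.modify, PySem.Dict.contains, PySem.Dict.get?, PySem.Dict.getD, PySem.Dict.insert], ih]
          simp [← h2, add_comm, add_left_comm]
        by_cases h3 : "local" = aqmCt p
        · rw [show aqmMapBack CATEGORY_TO_CONTENT_TYPE.items (aqmCt p)
              (PySem.Dict.mk [("あるある", a), ("給与", b), ("地域ネタ", c), ("転職", d), ("トレンド", e)]) =
              PySem.Dict.mk [("あるある", a), ("給与", b), ("地域ネタ", c + 1), ("転職", d), ("トレンド", e)] from by
            simp [aqmMapBack, CATEGORY_TO_CONTENT_TYPE, beq_iff_eq, ← h3,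
                  PySem.Dict.modify, PySem.Dict.contains, PySem.Dict.get?, PySem.Dict.getD, PySem.Dict.insert], ih]
          simp [← h3, add_comm, add_left_comm]
        by_cases h4 : "career" = aqmCt p
        · rw [show aqmMapBack CATEGORY_TO_CONTENT_TYPE.items (aqmCt p)
              (PySem.Dict.mk [("あるある", a), ("給与", b), ("地域ネタ", c), ("転職", d), ("トレンド", e)]) =
              PySem.Dict.mk [("あるある", a), ("給与", b), ("地域ネタ", c), ("転職", d + 1), ("トレンド", e)] from by
            simp [aqmMapBack, CATEGORY_TO_CONTENT_TYPE, beq_iff_eq, ← h4,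
                  PySem.Dict.modify, PySem.Dict.contains, PySem.Dict.get?, PySem.Dict.getD, PySem.Dict.insert], ih]
          simp [← h4, add_comm, add_left_comm]
        by_cases h5 : "trend" = aqmCt p
        · rw [show aqmMapBack CATEGORY_TO_CONTENT_TYPE.items (aqmCt p)
              (PySem.Dict.mk [("あるある", a), ("給与", b), ("地域ネタ", c), ("転職", d), ("トレンド", e)]) =
              PySem.Dict.mk [("あるある", a), ("給与", b), ("地域ネタ", c), ("転職", d), ("トレンド", e + 1)] from by
            simp [aqmMapBack, CATEGORY_TO_CONTENT_TYPE, beq_iff_eq, ← h5,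
                  PySem.Dict.modify, PySem.Dict.contains, PySem.Dict.get?, PySem.Dict.getD, PySem.Dict.insert], ih]
          simp [← h5, add_comm, add_left_comm]
        rw [show aqmMapBack CATEGORY_TO_CONTENT_TYPE.items (aqmCt p)
              (PySem.Dict.mk [("あるある", a), ("給与", b), ("地域ネタ", c), ("転職", d), ("トレンド", e)]) =
              PySem.Dict.mk [("あるある", a), ("給与", b), ("地域ネタ", c), ("転職", d), ("トレンド", e)] from by
            simp [aqmMapBack, CATEGORY_TO_CONTENT_TYPE, beq_iff_eq, h1, h2, h3, h4, h5], ih]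
        simp [Ne.symm h1, Ne.symm h2, Ne.symm h3, Ne.symm h4, Ne.symm h5]
      · rw [if_neg h, if_neg h, ih]

-- ===== VERDICT (by name: the statement is the Claim_ definition above) =====
theorem analyze_queue_mix_spec : Claim_equal_analyze_queue_mix := by
  intro queue _
  show analyze_queue_mix queue = analyze_queue_mix_alt queue
  simp only [analyze_queue_mix, analyze_queue_mix_alt]
  rw [aqmA_fold]
  simp only [CATEGORY_TO_CONTENT_TYPE, List.map_cons, List.map_nil, aqmB_count]
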